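-- pv_equiv track=rewrite | github.com/hackingmath/puzzles | weekend_puzzle_093019.py | col_repeat
-- ===== SOURCE A (Python) =====
-- def col_repeat(board, n):
--     """Returns True if there's a repeat in column n"""
--     this_col = []
--     for i, x in enumerate(board):
--         if i % 12 == n:
--             this_col.append(x)
--     # println("col "+str(n))
--     # println(this_col)
--     for letter in 'abcdef':
--         if this_col.count(letter) > 1:
--             # println(this_col)
--             return True
--     return False
-- ===== SOURCE B (Python) =====
-- def col_repeat(board, n):
--     """Returns True if there's a repeat in column n"""
--     seen = set()
--     for i, x in enumerate(board):
--         if i % 12 == n and x in {'a', 'b', 'c', 'd', 'e', 'f'}: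
--             if x in seen:
--                 return True
--             seen.add(x)
--     return False
-- ===== Notes on version B (the rewrite author's own statement) =====
-- stated objective: simpler
-- what changed: Single early-returning pass over the board with a seen-set that detects a duplicate a-f letter in column n, instead of building the column list and then running six separate .count scans over it.
import Mathlib
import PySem

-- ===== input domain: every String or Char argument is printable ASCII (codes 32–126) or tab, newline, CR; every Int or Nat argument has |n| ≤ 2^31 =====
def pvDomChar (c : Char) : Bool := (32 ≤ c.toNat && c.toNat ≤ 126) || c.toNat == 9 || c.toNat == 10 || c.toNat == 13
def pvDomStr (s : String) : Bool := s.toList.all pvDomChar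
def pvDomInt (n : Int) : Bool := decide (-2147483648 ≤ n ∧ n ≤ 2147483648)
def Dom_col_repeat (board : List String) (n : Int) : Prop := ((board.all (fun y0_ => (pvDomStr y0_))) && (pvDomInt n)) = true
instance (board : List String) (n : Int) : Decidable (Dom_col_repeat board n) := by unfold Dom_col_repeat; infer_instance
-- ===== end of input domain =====

-- B replaces A's column list + six .count scans by one early-returning pass with a seen-set (objective: simpler).

-- ===== PORT A =====
def col_repeat (board : List String) (n : Int) : Bool :=
  let this_col := (PySem.List.enumerate board 0).foldl
    (fun acc p => if PySem.Int.mod p.1 12 == n then acc ++ [p.2] else acc) []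
  ("abcdef".toList).any (fun letter => decide (PySem.List.count this_col (String.ofList [letter]) > 1))

-- ===== PORT B =====
-- the 'for i, x in enumerate(board): …' loop of Source B, with its early return
def colRepGo (n : Int) : List (Int × String) → PySem.Set String → Bool
  | [], _ => false
  | (i, x) :: rest, seen =>
    if PySem.Int.mod i 12 == n && ["a", "b", "c", "d", "e", "f"].contains x then
      if PySem.Set.contains seen x then true
      else colRepGo n rest (PySem.Set.add seen x)
    else colRepGo n rest seen

def col_repeat_alt (board : List String) (n : Int) : Bool :=
  colRepGo n (PySem.List.enumerate board 0) PySem.Set.empty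

-- ===== PRECONDITION & SPEC =====
def Spec_col_repeat (board : List String) (n : Int) (out : Bool) : Prop := out = col_repeat_alt board n
instance (board : List String) (n : Int) (out : Bool) : Decidable (Spec_col_repeat board n out) := by unfold Spec_col_repeat; infer_instance

-- ===== CLAIM (what is proved, stated in full; the proofs are below) =====
def Claim_equal_col_repeat : Prop := ∀ (board : List String) (n : Int), Dom_col_repeat board n → Spec_col_repeat board n (col_repeat board n)

-- ===== LEMMAS AND PROOFS =====

theorem pv_any_congr {α : Type} (l : List α) (f g : α → Bool)
    (h : ∀ x ∈ l, f x = g x) : l.any f = l.any g := by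
  induction l with
  | nil => rfl
  | cons a t ih =>
    simp only [List.any_cons, h a (List.mem_cons_self), ih (fun x hx => h x (List.mem_cons_of_mem a hx))]

theorem pv_contains_add (s : PySem.Set String) (x y : String) :
    PySem.Set.contains (PySem.Set.add s x) y = (PySem.Set.contains s y || y == x) := by
  by_cases hyx : y = x <;> by_cases hy : y ∈ s <;>
    simp [PySem.Set.add, PySem.Set.contains, hyx, hy] <;> split <;> simp_all

-- the column of A / the filtered stream of B, as a filter-map
def pvCol (n : Int) (l : List (Int × String)) : List String :=
  (l.filter (fun p => PySem.Int.mod p.1 12 == n)).map Prod.snd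

theorem pvCol_cons_pos (n i : Int) (x : String) (rest : List (Int × String))
    (h : (PySem.Int.mod i 12 == n) = true) :
    pvCol n ((i, x) :: rest) = x :: pvCol n rest := by
  simp only [pvCol, List.filter_cons, h, if_pos, List.map_cons]

theorem pvCol_cons_neg (n i : Int) (x : String) (rest : List (Int × String))
    (h : ¬ (PySem.Int.mod i 12 == n) = true) :
    pvCol n ((i, x) :: rest) = pvCol n rest := by
  simp only [pvCol, List.filter_cons]
  rw [if_neg (by simpa using h)]

theorem pv_go_eq (n : Int) (l : List (Int × String)) (seen : PySem.Set String) :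
    colRepGo n l seen =
      (["a", "b", "c", "d", "e", "f"] : List String).any (fun s =>
        decide (PySem.List.count (pvCol n l) s
          + (if PySem.Set.contains seen s then 1 else 0) > 1)) := by
  induction l generalizing seen with
  | nil =>
    simp only [colRepGo, pvCol, List.filter_nil, List.map_nil]
    simp [PySem.List.count]
    split_ifs <;> simp
  | cons p rest ih =>
    obtain ⟨i, x⟩ := p
    simp only [colRepGo]
    by_cases hmod : (PySem.Int.mod i 12 == n) = true
    · by_cases hmem : (["a", "b", "c", "d", "e", "f"] : List String).contains x = true
      · have hc : (PySem.Int.mod i 12 == n && (["a", "b", "c", "d", "e", "f"] : List String).contains x) = true := by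
          rw [Bool.and_eq_true]; exact ⟨hmod, hmem⟩
        have hmem' : x ∈ (["a", "b", "c", "d", "e", "f"] : List String) := by simpa using hmem
        rw [if_pos hc]
        have hcol := pvCol_cons_pos n i x rest hmod
        by_cases hseen : PySem.Set.contains seen x = true
        · rw [if_pos hseen]
          symm
          rw [List.any_eq_true]
          refine ⟨x, hmem', ?_⟩
          rw [decide_eq_true_iff, hcol]
          simp only [PySem.List.count_eq, List.count_cons_self, hseen, if_pos]
          omega
        · rw [if_neg hseen, ih]
          apply pv_any_congr
          intro s hs
          rw [decide_eq_decide, hcol, pv_contains_add]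
          by_cases hsx : s = x
          · subst hsx
            have hseen2 : ¬ s ∈ seen := by simpa [PySem.Set.contains] using hseen
            simp only [PySem.List.count_eq, List.count_cons_self, BEq.rfl, Bool.or_true]
            simp [hseen2]
          · have hbeq : (s == x) = false := by simpa using hsx
            have hbeq2 : (x == s) = false := beq_eq_false_iff_ne.mpr (fun h => hsx h.symm)
            simp only [PySem.List.count_eq, List.count_cons, hbeq, hbeq2, Bool.or_false,
              Bool.false_eq_true, if_false, Nat.add_zero]
      · have hc : ¬ (PySem.Int.mod i 12 == n && (["a", "b", "c", "d", "e", "f"] : List String).contains x) = true := by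
          rw [Bool.and_eq_true]; exact fun h => hmem h.2
        rw [if_neg hc, ih]
        apply pv_any_congr
        intro s hs
        have hsx : ¬ x = s := by
          intro h; subst h; exact hmem (by simpa using hs)
        have hbeq2 : (x == s) = false := beq_eq_false_iff_ne.mpr hsx
        rw [decide_eq_decide, pvCol_cons_pos n i x rest hmod]
        simp only [PySem.List.count_eq, List.count_cons, hbeq2,
          Bool.false_eq_true, if_false, Nat.add_zero]
    · have hc : ¬ (PySem.Int.mod i 12 == n && (["a", "b", "c", "d", "e", "f"] : List String).contains x) = true := by
        rw [Bool.and_eq_true]; exact fun h => hmod h.1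
      rw [if_neg hc, ih, pvCol_cons_neg n i x rest hmod]

-- ===== VERDICT (by name: the statement is the Claim_ definition above) =====
theorem col_repeat_spec : Claim_equal_col_repeat := by
  intro board n _
  unfold Spec_col_repeat col_repeat col_repeat_alt
  rw [pv_go_eq]
  have hcol : (PySem.List.enumerate board 0).foldl
      (fun acc p => if PySem.Int.mod p.1 12 == n then acc ++ [p.2] else acc) []
      = pvCol n (PySem.List.enumerate board 0) := by
    simpa [pvCol] using
      (PySem.List.foldl_append_if (l := PySem.List.enumerate board 0)
        (p := fun p => PySem.Int.mod p.1 12 == n) (f := Prod.snd) (acc := []))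
  rw [hcol]
  have htl : ("abcdef".toList) = ['a', 'b', 'c', 'd', 'e', 'f'] := rfl
  rw [htl]
  have e1 : String.ofList ['a'] = "a" := rfl
  have e2 : String.ofList ['b'] = "b" := rfl
  have e3 : String.ofList ['c'] = "c" := rfl
  have e4 : String.ofList ['d'] = "d" := rfl
  have e5 : String.ofList ['e'] = "e" := rfl
  have e6 : String.ofList ['f'] = "f" := rfl
  simp [PySem.Set.empty, PySem.Set.contains, List.any_cons, List.any_nil,
    e1, e2, e3, e4, e5, e6]
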